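-- pv_equiv track=rewrite | github.com/daniel-reich/ubiquitous-fiesta | 28mJ6NgqbQS4YRgDc_18.py | can_pay_cost
-- ===== SOURCE A (Python) =====
-- def can_pay_cost(mana_pool, cost):
--     dgt = ''.join(i for i in cost if i.isdigit())
--     alp = ''.join(i for i in cost if i.isalpha())
--     cst = int(dgt) if len(dgt) > 0 else 0
--     for a in alp:
--         if a in mana_pool:
--             alp = alp.replace(a, '', 1)
--             mana_pool = mana_pool.replace(a, '', 1)
--         else:
--             return False
--     rem_c = cst*'1'+alp
--     return len(mana_pool) >= len(rem_c)
-- ===== SOURCE B (Python) =====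
-- def can_pay_cost(mana_pool, cost):
--     dgt = ''.join(c for c in cost if c.isdigit())
--     alp = [c for c in cost if c.isalpha()]
--     cst = int(dgt) if dgt else 0
--     if any(alp.count(c) > mana_pool.count(c) for c in set(alp)):
--         return False
--     return len(mana_pool) - len(alp) >= cst
-- ===== Notes on version B (the rewrite author's own statement) =====
-- stated objective: faster
-- what changed: Replaces A's incremental loop that removes each letter one-by-one from both the cost letters and the mana pool (via repeated str.replace, quadratic in string length) with an up-front per-letter count containment check over the distinct letters plus a single arithmetic comparison len(mana_pool)-len(alp) >= cst.
import Mathlib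
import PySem

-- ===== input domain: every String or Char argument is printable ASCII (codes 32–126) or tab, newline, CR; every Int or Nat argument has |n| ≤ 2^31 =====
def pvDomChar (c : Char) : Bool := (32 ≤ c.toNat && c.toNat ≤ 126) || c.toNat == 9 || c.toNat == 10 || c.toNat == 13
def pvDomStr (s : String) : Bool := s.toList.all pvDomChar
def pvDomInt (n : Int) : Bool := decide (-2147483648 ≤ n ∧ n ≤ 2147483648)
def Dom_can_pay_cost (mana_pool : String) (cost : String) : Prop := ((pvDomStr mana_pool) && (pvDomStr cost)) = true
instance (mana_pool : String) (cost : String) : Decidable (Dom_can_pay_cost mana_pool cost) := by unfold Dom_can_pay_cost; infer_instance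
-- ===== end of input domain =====

-- B replaces A's incremental remove-one-letter-at-a-time loop by an up-front multiset
-- count comparison over distinct letters plus one length arithmetic check (objective: faster — measured; A rebuilds both strings per letter).

-- ===== PORT A =====
-- A's `for a in alp` loop: iterates the ORIGINAL letter string (Python's for captures the
-- object at loop start); state = (current alp, current mana_pool).
-- `s.replace(a, '', 1)` for a single char a removes the first occurrence = List.erase.
def pvPayLoop : List Char → List Char → List Char → Option (List Char × List Char)
  | [], alp, pool => some (alp, pool)
  | a :: todo, alp, pool =>
      if pool.contains a then pvPayLoop todo (alp.erase a) (pool.erase a)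
      else none

def can_pay_cost (mana_pool : String) (cost : String) : Bool :=
  let dgt := cost.toList.filter (fun c => PySem.Chars.isdigit c)
  let alp := cost.toList.filter (fun c => PySem.Chars.isalpha c)
  -- int(dgt): never ValueError here (dgt is a nonempty digit string), so .getD 0 is unreachable
  let cst : Int := if dgt.length > 0 then (PySem.Int.ofChars? dgt).getD 0 else 0
  match pvPayLoop alp alp mana_pool.toList with
  | none => false
  | some (alp', pool') =>
      -- rem_c = cst*'1' + alp ; Python's n*'1' is empty for n < 0, matching toNat
      let rem_c := List.replicate cst.toNat '1' ++ alp'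
      decide (rem_c.length ≤ pool'.length)

-- ===== PORT B =====
def can_pay_cost_alt (mana_pool : String) (cost : String) : Bool :=
  let dgt := cost.toList.filter (fun c => PySem.Chars.isdigit c)
  let alp := cost.toList.filter (fun c => PySem.Chars.isalpha c)
  let cst : Int := if dgt.length > 0 then (PySem.Int.ofChars? dgt).getD 0 else 0
  let pool := mana_pool.toList
  if (PySem.Set.ofList alp).any (fun c => pool.count c < alp.count c) then false
  else decide (cst ≤ (pool.length : Int) - alp.length)

-- ===== PRECONDITION & SPEC =====
def Spec_can_pay_cost (mana_pool : String) (cost : String) (out : Bool) : Prop := out = can_pay_cost_alt mana_pool cost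
instance (mana_pool : String) (cost : String) (out : Bool) : Decidable (Spec_can_pay_cost mana_pool cost out) := by unfold Spec_can_pay_cost; infer_instance

-- ===== CLAIM (what is proved, stated in full; the proofs are below) =====
def Claim_equal_can_pay_cost : Prop := ∀ (mana_pool : String) (cost : String), Dom_can_pay_cost mana_pool cost → Spec_can_pay_cost mana_pool cost (can_pay_cost mana_pool cost)

-- ===== LEMMAS AND PROOFS =====

-- A's loop succeeds exactly when the pending letters fit (as a multiset) in the pool,
-- and then the final state is the fold of first-occurrence erasures.
theorem pvPayLoop_eq (todo : List Char) : ∀ (alp pool : List Char),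
    pvPayLoop todo alp pool =
      if List.Subperm todo pool then some (todo.foldl List.erase alp, todo.foldl List.erase pool)
      else none := by
  induction todo with
  | nil => intro alp pool; simp [pvPayLoop, List.nil_subperm]
  | cons a todo ih =>
      intro alp pool
      by_cases hmem : a ∈ pool
      · rw [pvPayLoop]
        simp only [List.contains_eq_mem, hmem, decide_true, if_true, ih]
        have hp : pool.Perm (a :: pool.erase a) := List.perm_cons_erase hmem
        have : List.Subperm (a :: todo) pool ↔ List.Subperm todo (pool.erase a) := by
          constructor
          · intro h
            exact (List.subperm_cons a).1 (h.trans hp.subperm)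
          · intro h
            exact ((List.subperm_cons a).2 h).trans hp.symm.subperm
        rw [if_congr this rfl rfl]
        simp [List.foldl]
      · rw [pvPayLoop]
        simp only [List.contains_eq_mem, hmem, decide_false]
        have : ¬ List.Subperm (a :: todo) pool := fun h => hmem (h.subset (List.mem_cons_self))
        simp [this]

theorem foldl_erase_self (l : List Char) : l.foldl List.erase l = [] := by
  induction l with
  | nil => rfl
  | cons a l ih => simpa [List.foldl, List.erase_cons_head] using ih

theorem foldl_erase_length (todo : List Char) : ∀ (pool : List Char), List.Subperm todo pool →
    (todo.foldl List.erase pool).length = pool.length - todo.length := by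
  induction todo with
  | nil => intro pool _; rfl
  | cons a todo ih =>
      intro pool h
      have hmem : a ∈ pool := h.subset (List.mem_cons_self)
      have h' : List.Subperm todo (pool.erase a) :=
        (List.subperm_cons a).1 (h.trans (List.perm_cons_erase hmem).subperm)
      have := ih (pool.erase a) h'
      simp only [List.foldl] at *
      rw [this, List.length_erase_of_mem hmem]
      have := h.length_le
      simp at this ⊢
      omega

theorem set_any_false_iff (alp pool : List Char) :
    ((PySem.Set.ofList alp).any (fun c => pool.count c < alp.count c) = false) ↔ List.Subperm alp pool := by
  rw [List.subperm_ext_iff]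
  simp [PySem.Set.mem_ofList, not_lt]

theorem pv_core (alp pool : List Char) (cst : Int) :
    (match pvPayLoop alp alp pool with
     | none => false
     | some (alp', pool') => decide ((List.replicate cst.toNat '1' ++ alp').length ≤ pool'.length))
    = (if (PySem.Set.ofList alp).any (fun c => pool.count c < alp.count c) then false
       else decide (cst ≤ (pool.length : Int) - alp.length)) := by
  rw [pvPayLoop_eq]
  by_cases h : List.Subperm alp pool
  · have hany : ((PySem.Set.ofList alp).any (fun c => pool.count c < alp.count c)) = false :=
      (set_any_false_iff alp pool).2 h
    simp only [h, if_true, hany, Bool.false_eq_true, if_false,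
      foldl_erase_self, foldl_erase_length alp pool h,
      List.length_append, List.length_replicate, List.length_nil]
    have hle := h.length_le
    rw [decide_eq_decide]
    omega
  · have hany : ((PySem.Set.ofList alp).any (fun c => pool.count c < alp.count c)) = true := by
      cases hb : (PySem.Set.ofList alp).any (fun c => pool.count c < alp.count c)
      · exact absurd ((set_any_false_iff alp pool).1 hb) h
      · rfl
    simp [h, hany]

-- ===== VERDICT (by name: the statement is the Claim_ definition above) =====
theorem can_pay_cost_spec : Claim_equal_can_pay_cost := by
  intro mana_pool cost _
  show can_pay_cost mana_pool cost = can_pay_cost_alt mana_pool cost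
  exact pv_core (cost.toList.filter (fun c => PySem.Chars.isalpha c)) mana_pool.toList
    (if (cost.toList.filter (fun c => PySem.Chars.isdigit c)).length > 0 then
      (PySem.Int.ofChars? (cost.toList.filter (fun c => PySem.Chars.isdigit c))).getD 0 else 0)
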